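-- pv_equiv track=rewrite | github.com/Donkey-1028/algorithms | find_same_name.py | find_same_name
-- ===== SOURCE A (Python) =====
-- def find_same_name(n):
--     name_dict = {}
--     for name in n:
--         if name in name_dict:
--             name_dict[name] += 1
--         else:
--             name_dict[name] = 1
--
--     result = set()
--     for index in name_dict:
--         if name_dict[index] > 1:
--             result.add(index)
--
--     return result
--
-- name = ["Tom", "Jerry", "Mike", "Tom"]
-- ===== SOURCE B (Python) =====
-- def find_same_name(n):
--     seen = set()
--     unique = set()
--     for name in n:
--         if name in seen:
--             unique.discard(name)
--         else:
--             seen.add(name)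
--             unique.add(name)
--     return seen - unique
-- ===== Notes on version B (the rewrite author's own statement) =====
-- stated objective: alternative
-- what changed: Replaces the count-dict-then-filter two-loop structure with a single pass maintaining two sets ('seen' and 'unique', names seen exactly once so far) and returning the set difference seen - unique; no counts are kept.
import Mathlib
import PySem

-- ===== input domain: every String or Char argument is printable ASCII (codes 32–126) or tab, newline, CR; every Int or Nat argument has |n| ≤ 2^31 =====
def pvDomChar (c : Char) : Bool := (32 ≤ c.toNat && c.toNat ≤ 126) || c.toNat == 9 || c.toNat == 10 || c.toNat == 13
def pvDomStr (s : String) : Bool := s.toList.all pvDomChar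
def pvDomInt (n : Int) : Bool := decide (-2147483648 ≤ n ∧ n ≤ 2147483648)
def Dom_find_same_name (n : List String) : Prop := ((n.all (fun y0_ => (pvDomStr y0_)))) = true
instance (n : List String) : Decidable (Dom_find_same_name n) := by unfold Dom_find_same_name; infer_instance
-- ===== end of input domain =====

-- B replaces A's count-dict-then-filter two-loop structure with a single pass over two
-- sets ('seen' and 'unique'), returning the set difference seen - unique (alternative; not faster).


-- ===== PORT A =====
-- first loop: build the counting dict ('name_dict[name] += 1' is d[name] = d[name] + 1, i.e. Dict.modify with default 0)
-- second loop: iterate the dict's keys (insertion order) and collect keys with count > 1 into a set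
def find_same_name (n : List String) : List String :=
  let name_dict : PySem.Dict String Int :=
    n.foldl (fun d name =>
      if d.contains name then d.modify name 0 (· + 1) else d.insert name 1)
      PySem.Dict.empty
  name_dict.keys.foldl (fun result index =>
      if name_dict.getD index 0 > 1 then PySem.Set.add result index else result)
    PySem.Set.empty

-- ===== PORT B =====
-- single pass: 'seen' and 'unique' sets; 'unique.discard(name)' / 'seen.add(name)' / 'unique.add(name)';
-- finally the set difference 'seen - unique'
def find_same_name_alt (n : List String) : List String :=
  let su := n.foldl (fun (su : List String × List String) name =>
      if PySem.Set.contains su.1 name then (su.1, PySem.Set.discard su.2 name)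
      else (PySem.Set.add su.1 name, PySem.Set.add su.2 name))
    (PySem.Set.empty, PySem.Set.empty)
  PySem.Set.diff su.1 su.2

-- ===== PRECONDITION & SPEC =====
def Spec_find_same_name (n : List String) (out : List String) : Prop := out = find_same_name_alt n
instance (n : List String) (out : List String) : Decidable (Spec_find_same_name n out) := by unfold Spec_find_same_name; infer_instance

-- ===== CLAIM (what is proved, stated in full; the proofs are below) =====
def Claim_equal_find_same_name : Prop := ∀ (n : List String), Dom_find_same_name n → Spec_find_same_name n (find_same_name n)

-- ===== LEMMAS AND PROOFS =====

-- `pick c s l`: the elements that a fold of "if c x then Set.add r x else r" over l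
-- appends to a set r whose membership is that of s.
def pick (c : String → Bool) : List String → List String → List String
  | _, [] => []
  | s, x :: t =>
    if c x then
      if x ∈ s then pick c s t else x :: pick c (s ++ [x]) t
    else pick c s t

theorem foldl_step_eq_pick (c : String → Bool) :
    ∀ (l s : List String),
      l.foldl (fun r x => if c x then PySem.Set.add r x else r) s = s ++ pick c s l := by
  intro l
  induction l with
  | nil => intro s; simp [pick]
  | cons x t ih =>
    intro s
    rw [List.foldl_cons]
    by_cases hc : c x
    · rw [if_pos hc]
      by_cases hm : x ∈ s
      · rw [show PySem.Set.add s x = s by simp [PySem.Set.add, hm], ih s]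
        simp [pick, hc, hm]
      · rw [show PySem.Set.add s x = s ++ [x] by simp [PySem.Set.add, hm], ih (s ++ [x])]
        simp [pick, hc, hm]
    · rw [if_neg hc, ih s]
      simp [pick, hc]

theorem foldl_add_eq_pick_true :
    ∀ (l s : List String),
      l.foldl PySem.Set.add s = s ++ pick (fun _ => true) s l := by
  intro l
  induction l with
  | nil => intro s; simp [pick]
  | cons x t ih =>
    intro s
    rw [List.foldl_cons]
    by_cases hm : x ∈ s
    · rw [show PySem.Set.add s x = s by simp [PySem.Set.add, hm], ih s]
      simp [pick, hm]
    · rw [show PySem.Set.add s x = s ++ [x] by simp [PySem.Set.add, hm], ih (s ++ [x])]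
      simp [pick, hm]

-- `pick c` is a filter of the all-true pick; the larger seen-set may carry extra c-false elements.
theorem pick_eq_filter_pick_true (c : String → Bool) :
    ∀ (l s₁ s₂ : List String),
      (∀ x, x ∈ s₁ → x ∈ s₂) → (∀ x, x ∈ s₂ → x ∈ s₁ ∨ c x = false) →
      pick c s₁ l = (pick (fun _ => true) s₂ l).filter c := by
  intro l
  induction l with
  | nil => intro s₁ s₂ _ _; simp [pick]
  | cons x t ih =>
    intro s₁ s₂ h12 h21
    by_cases hm2 : x ∈ s₂
    · rcases h21 x hm2 with hm1 | hcf
      · by_cases hc : c x <;> simp [pick, hc, hm1, hm2, ih s₁ s₂ h12 h21]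
      · simp [pick, hcf, hm2, ih s₁ s₂ h12 h21]
    · by_cases hc : c x
      · have hm1 : x ∉ s₁ := fun h => hm2 (h12 x h)
        have ih' := ih (s₁ ++ [x]) (s₂ ++ [x])
          (fun y hy => by
            rcases List.mem_append.1 hy with h | h
            · exact List.mem_append.2 (Or.inl (h12 y h))
            · exact List.mem_append.2 (Or.inr h))
          (fun y hy => by
            rcases List.mem_append.1 hy with h | h
            · rcases h21 y h with h' | h'
              · exact Or.inl (List.mem_append.2 (Or.inl h'))
              · exact Or.inr h'
            · exact Or.inl (List.mem_append.2 (Or.inr h)))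
        simp [pick, hc, hm1, hm2, ih']
      · have ih' := ih s₁ (s₂ ++ [x])
          (fun y hy => List.mem_append.2 (Or.inl (h12 y hy)))
          (fun y hy => by
            rcases List.mem_append.1 hy with h | h
            · exact h21 y h
            · simp at h; subst h; right; simpa using hc)
        simp [pick, hc, hm2, ih']

-- the elements produced by the all-true pick are nodup and disjoint from the seen-set
theorem pick_true_nodup_disjoint :
    ∀ (l s : List String),
      (pick (fun _ => true) s l).Nodup ∧ ∀ x ∈ pick (fun _ => true) s l, x ∉ s := by
  intro l
  induction l with
  | nil => intro s; simp [pick]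
  | cons x t ih =>
    intro s
    by_cases hm : x ∈ s
    · have hred : pick (fun _ => true) s (x :: t) = pick (fun _ => true) s t := by
        simp [pick, hm]
      rw [hred]; exact ih s
    · obtain ⟨hnd, hdis⟩ := ih (s ++ [x])
      have hred : pick (fun _ => true) s (x :: t)
          = x :: pick (fun _ => true) (s ++ [x]) t := by
        simp [pick, hm]
      rw [hred]
      constructor
      · rw [List.nodup_cons]
        refine ⟨fun hxin => ?_, hnd⟩
        exact hdis x hxin (List.mem_append.2 (Or.inr (by simp)))
      · intro y hy
        rcases List.mem_cons.1 hy with rfl | hy'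
        · exact hm
        · exact fun hys => hdis y hy' (List.mem_append.2 (Or.inl hys))

-- the all-true pick of a nodup list disjoint from the seen-set is the list itself
theorem pick_true_of_nodup :
    ∀ (l s : List String), l.Nodup → (∀ x ∈ l, x ∉ s) →
      pick (fun _ => true) s l = l := by
  intro l
  induction l with
  | nil => intro s _ _; simp [pick]
  | cons x t ih =>
    intro s hnd hdis
    have hm : x ∉ s := hdis x (by simp)
    have hred : pick (fun _ => true) s (x :: t)
        = x :: pick (fun _ => true) (s ++ [x]) t := by
      simp [pick, hm]
    have hdis' : ∀ y ∈ t, y ∉ s ++ [x] := by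
      intro y hy hmem
      rcases List.mem_append.1 hmem with h | h
      · exact hdis y (by simp [hy]) h
      · simp at h; subst h
        exact (List.nodup_cons.1 hnd).1 hy
    rw [hred, ih (s ++ [x]) hnd.of_cons hdis']

-- the counting loop of A builds exactly Counter(n)
theorem name_dict_eq_counter (n : List String) :
    n.foldl (fun d name =>
      if d.contains name then d.modify name 0 (· + 1) else d.insert name 1)
      PySem.Dict.empty = PySem.Dict.counter n := by
  rw [PySem.Dict.counter_eq_foldl]
  induction n using List.reverseRecOn with
  | nil => rfl
  | append_singleton t x ih =>
    rw [List.foldl_append, List.foldl_append, ih]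
    simp only [List.foldl_cons, List.foldl_nil]
    generalize (t.foldl (fun d x => d.modify x 0 (· + 1)) PySem.Dict.empty :
      PySem.Dict String Int) = D
    by_cases h : D.contains x
    · simp [h]
    · simp only [Bool.not_eq_true] at h
      have h' : D.get? x = none := by
        rw [PySem.Dict.contains_eq_isSome_get?] at h
        cases hg : D.get? x <;> simp [hg] at h ⊢
      simp [PySem.Dict.modify, PySem.Dict.getD, PySem.Dict.insert, h', h]

theorem set_discard_eq_filter (s : List String) (x : String) :
    PySem.Set.discard s x = s.filter (fun y => !(y == x)) := by
  simp [PySem.Set.discard]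

theorem set_diff_eq_filter (s t : List String) :
    PySem.Set.diff s t = s.filter (fun y => !t.contains y) := by
  simp [PySem.Set.diff]

-- B's loop invariant: after processing l, seen = set(l) (first occurrences in order) and
-- unique = the elements of seen occurring exactly once in l
theorem b_loop_inv : ∀ (l : List String),
    l.foldl (fun (su : List String × List String) name =>
        if PySem.Set.contains su.1 name then (su.1, PySem.Set.discard su.2 name)
        else (PySem.Set.add su.1 name, PySem.Set.add su.2 name))
      (PySem.Set.empty, PySem.Set.empty)
    = (PySem.Set.ofList l, (PySem.Set.ofList l).filter (fun y => l.count y == 1)) := by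
  intro l
  induction l using List.reverseRecOn with
  | nil => rfl
  | append_singleton t x ih =>
    rw [List.foldl_append, ih]
    simp only [List.foldl_cons, List.foldl_nil]
    have hadd : PySem.Set.ofList (t ++ [x]) = PySem.Set.add (PySem.Set.ofList t) x := by
      rw [PySem.Set.ofList_eq_foldl, PySem.Set.ofList_eq_foldl, List.foldl_append]
      rfl
    by_cases hm : x ∈ t
    · have hms : x ∈ PySem.Set.ofList t := (PySem.Set.mem_ofList _ _).2 hm
      have hcon : PySem.Set.contains (PySem.Set.ofList t) x = true := by
        simp [PySem.Set.contains]; exact hm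
      have hseen : PySem.Set.ofList (t ++ [x]) = PySem.Set.ofList t := by
        rw [hadd]; simp [PySem.Set.add, hm]
      rw [if_pos hcon, hseen]
      refine Prod.ext rfl ?_
      show PySem.Set.discard ((PySem.Set.ofList t).filter (fun y => t.count y == 1)) x
          = (PySem.Set.ofList t).filter (fun y => (t ++ [x]).count y == 1)
      rw [set_discard_eq_filter, List.filter_filter]
      refine List.filter_congr ?_
      intro y hy
      by_cases hyx : y = x
      · subst hyx
        have : 1 ≤ t.count y := List.count_pos_iff.2 hm
        simp [List.count_append]
        omega
      · have hc0 : List.count y [x] = 0 := List.count_eq_zero.2 (by simp [hyx])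
        simp [List.count_append, hc0, hyx]
    · have hms : x ∉ PySem.Set.ofList t := fun h => hm ((PySem.Set.mem_ofList _ _).1 h)
      have hcon : PySem.Set.contains (PySem.Set.ofList t) x = false := by
        simp [PySem.Set.contains]; exact hm
      rw [if_neg (by rw [hcon]; exact Bool.false_ne_true)]
      have hseen : PySem.Set.add (PySem.Set.ofList t) x = PySem.Set.ofList (t ++ [x]) := by
        rw [hadd]
      refine Prod.ext hseen ?_
      show PySem.Set.add ((PySem.Set.ofList t).filter (fun y => t.count y == 1)) x
          = (PySem.Set.ofList (t ++ [x])).filter (fun y => (t ++ [x]).count y == 1)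
      have hmu : x ∉ (PySem.Set.ofList t).filter (fun y => t.count y == 1) := fun h =>
        hms (List.mem_of_mem_filter h)
      have hxcnt : ((t ++ [x]).count x == 1) = true := by
        have hc0 : List.count x t = 0 := List.count_eq_zero.2 hm
        simp [List.count_append, hc0]
      rw [hadd]
      rw [show PySem.Set.add (PySem.Set.ofList t) x = PySem.Set.ofList t ++ [x] by
        simp [PySem.Set.add, hm]]
      rw [List.filter_append]
      rw [show List.filter (fun y => (t ++ [x]).count y == 1) [x] = [x] by
        rw [List.filter_cons, if_pos hxcnt, List.filter_nil]]
      rw [show PySem.Set.add ((PySem.Set.ofList t).filter (fun y => t.count y == 1)) x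
            = (PySem.Set.ofList t).filter (fun y => t.count y == 1) ++ [x] by
        rw [show PySem.Set.add ((PySem.Set.ofList t).filter (fun y => t.count y == 1)) x
              = if x ∈ (PySem.Set.ofList t).filter (fun y => t.count y == 1)
                then (PySem.Set.ofList t).filter (fun y => t.count y == 1)
                else (PySem.Set.ofList t).filter (fun y => t.count y == 1) ++ [x] from by
          simp [PySem.Set.add], if_neg hmu]]
      refine congrArg (· ++ [x]) ?_
      refine (List.filter_congr ?_).symm
      intro y hy
      have hyx : y ≠ x := fun h => hms (h ▸ hy)
      have hc0 : List.count y [x] = 0 := List.count_eq_zero.2 (by simp [hyx])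
      simp [List.count_append, hc0]

-- the set difference seen - unique is exactly the duplicate filter of seen
theorem diff_filter (n : List String) :
    PySem.Set.diff (PySem.Set.ofList n) ((PySem.Set.ofList n).filter (fun y => n.count y == 1))
      = (PySem.Set.ofList n).filter (fun x => decide (PySem.List.count n x > 1)) := by
  rw [set_diff_eq_filter]
  refine List.filter_congr ?_
  intro y hy
  have hyn : y ∈ n := (PySem.Set.mem_ofList _ _).1 hy
  have hpos : 1 ≤ n.count y := List.count_pos_iff.2 hyn
  by_cases h1 : n.count y = 1
  · have : y ∈ (PySem.Set.ofList n).filter (fun y => n.count y == 1) :=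
      List.mem_filter.2 ⟨hy, by simp [h1]⟩
    simp [this, PySem.List.count, h1]
  · have : y ∉ (PySem.Set.ofList n).filter (fun y => n.count y == 1) := fun hmem =>
      h1 (by simpa using (List.mem_filter.1 hmem).2)
    simp [this, PySem.List.count]
    omega

-- ===== VERDICT (by name: the statement is the Claim_ definition above) =====
theorem find_same_name_spec : Claim_equal_find_same_name := by
  intro n _
  unfold Spec_find_same_name find_same_name find_same_name_alt
  simp only [name_dict_eq_counter n, PySem.Dict.keys_counter]
  -- the common Boolean condition of both folds
  have hcast : ∀ x : String, (PySem.Dict.counter n).getD x 0 > 1 ↔ PySem.List.count n x > 1 := by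
    intro x
    rw [PySem.Dict.getD_counter]
    simp [PySem.List.count]
  have hfoldA : ∀ (l s : List String),
      l.foldl (fun r x => if (PySem.Dict.counter n).getD x 0 > 1 then PySem.Set.add r x else r) s
        = l.foldl (fun r x => if decide (PySem.List.count n x > 1) then PySem.Set.add r x else r) s := by
    intro l
    induction l with
    | nil => intro s; rfl
    | cons x t ih =>
      intro s
      simp only [List.foldl_cons]
      rw [show (if (PySem.Dict.counter n).getD x 0 > 1 then PySem.Set.add s x else s)
            = (if decide (PySem.List.count n x > 1) then PySem.Set.add s x else s) by
        by_cases h : PySem.List.count n x > 1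
        · rw [if_pos ((hcast x).2 h), if_pos (by simpa using h)]
        · rw [if_neg (fun hh => h ((hcast x).1 hh)), if_neg (by simpa using h)]]
      exact ih _
  rw [hfoldA]
  set c : String → Bool := fun x => decide (PySem.List.count n x > 1) with hc
  have hofList : PySem.Set.ofList n = pick (fun _ => true) [] n := by
    rw [PySem.Set.ofList_eq_foldl]
    simpa using foldl_add_eq_pick_true n []
  obtain ⟨hnd, -⟩ := pick_true_nodup_disjoint n []
  calc (PySem.Set.ofList n).foldl (fun r x => if c x then PySem.Set.add r x else r) PySem.Set.empty
      = pick c [] (PySem.Set.ofList n) := by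
        simpa [PySem.Set.empty] using foldl_step_eq_pick c (PySem.Set.ofList n) []
    _ = (pick (fun _ => true) [] (PySem.Set.ofList n)).filter c :=
        pick_eq_filter_pick_true c _ [] [] (by simp) (by simp)
    _ = (PySem.Set.ofList n).filter c := by
        rw [pick_true_of_nodup (PySem.Set.ofList n) [] (by rw [hofList]; exact hnd) (by simp)]
    _ = PySem.Set.diff (PySem.Set.ofList n)
          ((PySem.Set.ofList n).filter (fun y => n.count y == 1)) := (diff_filter n).symm
    _ = (let su := n.foldl (fun (su : List String × List String) name =>
            if PySem.Set.contains su.1 name then (su.1, PySem.Set.discard su.2 name)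
            else (PySem.Set.add su.1 name, PySem.Set.add su.2 name))
          (PySem.Set.empty, PySem.Set.empty)
        PySem.Set.diff su.1 su.2) := by rw [b_loop_inv n]
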